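-- pv_equiv track=rewrite | github.com/adnansabbir/Problem-Solving | Leetcode/30-Day LeetCoding Challange/Perform String Shifts.py | reduce_shift
-- ===== SOURCE A (Python) =====
-- from typing import List
--
-- def reduce_shift(shifts: List[List[int]]) -> List[int]:
--     right_shift = 0
--     left_shift = 0
--     for shift in shifts:
--         if shift[0]:
--             right_shift += shift[1]
--         else:
--             left_shift += shift[1]
--
--     if right_shift > left_shift:
--         return [1, right_shift - left_shift]
--     else:
--         return [0, left_shift - right_shift]
-- ===== SOURCE B (Python) =====
-- from typing import List
--
-- def reduce_shift(shifts: List[List[int]]) -> List[int]: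
--     # Divide-and-conquer: recursively compute the signed net shift of each
--     # half of the index range, then decide direction from the sign.
--     def net(lo: int, hi: int) -> int:
--         if hi <= lo:
--             return 0
--         if hi - lo == 1:
--             s = shifts[lo]
--             return s[1] if s[0] else -s[1]
--         mid = (lo + hi) // 2
--         return net(lo, mid) + net(mid, hi)
--
--     n = net(0, len(shifts))
--     return [1, n] if n > 0 else [0, -n]
-- ===== Notes on version B (the rewrite author's own statement) =====
-- stated objective: alternative
-- what changed: Replaces A's linear loop with two direction counters by a divide-and-conquer recursion that splits the index range in half, computes the signed net shift of each half and adds them, then decides the direction from the sign of the total.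
import Mathlib
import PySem

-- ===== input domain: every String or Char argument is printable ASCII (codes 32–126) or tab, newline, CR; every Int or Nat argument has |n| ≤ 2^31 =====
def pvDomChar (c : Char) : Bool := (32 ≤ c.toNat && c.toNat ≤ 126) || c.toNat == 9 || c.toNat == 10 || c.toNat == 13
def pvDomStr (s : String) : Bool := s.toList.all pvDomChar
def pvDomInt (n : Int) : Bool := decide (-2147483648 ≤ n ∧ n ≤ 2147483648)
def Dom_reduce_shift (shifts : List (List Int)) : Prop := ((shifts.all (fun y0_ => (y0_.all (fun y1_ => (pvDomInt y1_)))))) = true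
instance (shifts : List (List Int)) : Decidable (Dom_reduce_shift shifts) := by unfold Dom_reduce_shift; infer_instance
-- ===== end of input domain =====

-- B replaces A's linear two-counter loop with a divide-and-conquer recursion on the index range (objective: alternative decomposition).

-- ===== PORT A =====
-- A: one loop over the list accumulating two counters (right, left); shift[0]/shift[1] via pyGet? (in range under Pre_).
def reduce_shift (shifts : List (List Int)) : List Int :=
  let rl := shifts.foldl (fun (acc : Int × Int) shift =>
    if ((PySem.List.pyGet? shift 0).getD 0) ≠ 0 then
      (acc.1 + (PySem.List.pyGet? shift 1).getD 0, acc.2)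
    else
      (acc.1, acc.2 + (PySem.List.pyGet? shift 1).getD 0)) (0, 0)
  if rl.1 > rl.2 then [1, rl.1 - rl.2] else [0, rl.2 - rl.1]

-- ===== PORT B =====
-- B's helper net(lo, hi): signed net shift of shifts[lo:hi] by splitting the index range in
-- half. Ported with a structural fuel parameter (fuel = hi - lo suffices) as a totality guard;
-- same computation on every reachable call.
def reduce_shift_net (shifts : List (List Int)) : Nat → Nat → Nat → Int
  | 0, _, _ => 0
  | fuel + 1, lo, hi =>
    if hi ≤ lo then 0
    else if hi - lo = 1 then
      let s := (PySem.List.pyGet? shifts (lo : Int)).getD []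
      if ((PySem.List.pyGet? s 0).getD 0) ≠ 0 then (PySem.List.pyGet? s 1).getD 0
      else -((PySem.List.pyGet? s 1).getD 0)
    else
      reduce_shift_net shifts fuel lo ((lo + hi) / 2)
        + reduce_shift_net shifts fuel ((lo + hi) / 2) hi

-- B: divide-and-conquer net over the whole index range, direction decided by the sign.
def reduce_shift_alt (shifts : List (List Int)) : List Int :=
  let n := reduce_shift_net shifts shifts.length 0 shifts.length
  if n > 0 then [1, n] else [0, -n]

-- ===== PRECONDITION & SPEC =====
-- Pre_: Python A indexes shift[0] and shift[1], raising IndexError on any inner list of length < 2.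
def Pre_reduce_shift (shifts : List (List Int)) : Prop :=
  ∀ s ∈ shifts, 2 ≤ s.length
instance (shifts : List (List Int)) : Decidable (Pre_reduce_shift shifts) := by
  unfold Pre_reduce_shift; infer_instance
def pvWitness_reduce_shift : List (List Int) := [[1, 2], [0, 1], [1, 3]]
def Spec_reduce_shift (shifts : List (List Int)) (out : List Int) : Prop := out = reduce_shift_alt shifts
instance (shifts : List (List Int)) (out : List Int) : Decidable (Spec_reduce_shift shifts out) := by unfold Spec_reduce_shift; infer_instance

-- ===== CLAIM (what is proved, stated in full; the proofs are below) =====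
def Claim_equal_reduce_shift : Prop := ∀ (shifts : List (List Int)), Dom_reduce_shift shifts → Pre_reduce_shift shifts → Spec_reduce_shift shifts (reduce_shift shifts)

-- ===== LEMMAS AND PROOFS =====
-- The signed contribution of one inner list.
def pvVal (s : List Int) : Int :=
  if ((PySem.List.pyGet? s 0).getD 0) ≠ 0 then (PySem.List.pyGet? s 1).getD 0
  else -((PySem.List.pyGet? s 1).getD 0)

-- B's recursion computes the Ico-sum of the per-index contributions (given enough fuel).
theorem reduce_shift_net_eq_sum (shifts : List (List Int)) (fuel lo hi : Nat)
    (hf : hi - lo ≤ fuel) :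
    reduce_shift_net shifts fuel lo hi
      = ∑ i ∈ Finset.Ico lo hi, pvVal ((PySem.List.pyGet? shifts (i : Int)).getD []) := by
  induction fuel generalizing lo hi with
  | zero =>
    rw [reduce_shift_net, Finset.Ico_eq_empty (by omega), Finset.sum_empty]
  | succ fuel ih =>
    rw [reduce_shift_net]
    by_cases h0 : hi ≤ lo
    · rw [if_pos h0, Finset.Ico_eq_empty (by omega), Finset.sum_empty]
    · by_cases h1 : hi - lo = 1
      · have hhi : hi = lo + 1 := by omega
        subst hhi
        rw [if_neg h0, if_pos h1, Nat.Ico_succ_singleton, Finset.sum_singleton]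
        rfl
      · rw [if_neg h0, if_neg h1, ih lo ((lo + hi) / 2) (by omega), ih ((lo + hi) / 2) hi (by omega),
            Finset.sum_Ico_consecutive _ (by omega) (by omega)]

-- A's pair fold difference equals the plain signed index-sum of the list.
theorem reduce_shift_pair_fold (shifts : List (List Int)) (r l : Int) :
    (shifts.foldl (fun (acc : Int × Int) shift =>
      if ((PySem.List.pyGet? shift 0).getD 0) ≠ 0 then
        (acc.1 + (PySem.List.pyGet? shift 1).getD 0, acc.2)
      else
        (acc.1, acc.2 + (PySem.List.pyGet? shift 1).getD 0)) (r, l)).1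
    - (shifts.foldl (fun (acc : Int × Int) shift =>
      if ((PySem.List.pyGet? shift 0).getD 0) ≠ 0 then
        (acc.1 + (PySem.List.pyGet? shift 1).getD 0, acc.2)
      else
        (acc.1, acc.2 + (PySem.List.pyGet? shift 1).getD 0)) (r, l)).2
    = (r - l) + ∑ i ∈ Finset.range shifts.length, pvVal ((PySem.List.pyGet? shifts (i : Int)).getD []) := by
  induction shifts generalizing r l with
  | nil => simp
  | cons s rest ih =>
    simp only [List.foldl_cons, List.length_cons]
    rw [Finset.sum_range_succ']
    have hshift : ∀ i : Nat,
        pvVal ((PySem.List.pyGet? (s :: rest) ((i + 1 : Nat) : Int)).getD [])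
          = pvVal ((PySem.List.pyGet? rest (i : Int)).getD []) := by
      intro i; simp
    have h0 : pvVal ((PySem.List.pyGet? (s :: rest) ((0 : Nat) : Int)).getD []) = pvVal s := by
      simp
    simp only [hshift, h0]
    split_ifs with h
    · rw [ih]; unfold pvVal; rw [if_pos h]; ring
    · rw [ih]; unfold pvVal; rw [if_neg h]; ring

-- ===== VERDICT (by name: the statement is the Claim_ definition above) =====
theorem reduce_shift_spec : Claim_equal_reduce_shift := by
  intro shifts _ _
  unfold Spec_reduce_shift reduce_shift reduce_shift_alt
  have hB := reduce_shift_net_eq_sum shifts shifts.length 0 shifts.length (by omega)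
  rw [← Finset.range_eq_Ico] at hB
  have hA := reduce_shift_pair_fold shifts 0 0
  simp only [sub_zero, zero_add] at hA
  set p := shifts.foldl (fun (acc : Int × Int) shift =>
      if ((PySem.List.pyGet? shift 0).getD 0) ≠ 0 then
        (acc.1 + (PySem.List.pyGet? shift 1).getD 0, acc.2)
      else
        (acc.1, acc.2 + (PySem.List.pyGet? shift 1).getD 0)) ((0 : Int), (0 : Int)) with hp
  rw [hB, ← hA]
  by_cases hc : p.1 > p.2
  · rw [if_pos hc, if_pos (show p.1 - p.2 > 0 by omega)]
  · rw [if_neg hc, if_neg (show ¬ p.1 - p.2 > 0 by omega)]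
    have : p.2 - p.1 = -(p.1 - p.2) := by ring
    rw [this]
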